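-- pv_equiv track=rewrite | github.com/jeonghyeonee/programmers_python_level1 | 위클리챌린지_4주차2.py | solution
-- ===== SOURCE A (Python) =====
-- def solution(table, languages, preference):
--     score = []
--     # table 2차원 리스트로 변경
--     # table 정렬하기
--     # why? 동일 점수일 경우 더 앞쪽의 것을 가져오기 위함
--     new_table = sorted([list(i.split()) for i in table], key=lambda  x:x[0])
--     type = {i:new_table[i][0] for i in range(len(new_table))}
--
--     for i in range(len(type)):
--         s = 0
--         for l, p in zip(languages, preference):
--             if l in new_table[i]:
--                 s += (6-new_table[i].index(l))*p
--         score.append(s)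
--
--     return type[score.index(max(score))]
-- ===== SOURCE B (Python) =====
-- def solution(table, languages, preference):
--     best_name = None
--     best_score = None
--     for row_str in table:
--         row = row_str.split()
--         s = sum((6 - row.index(l)) * p for l, p in zip(languages, preference) if l in row)
--         name = row[0]
--         if best_name is None or s > best_score or (s == best_score and name < best_name):
--             best_name, best_score = name, s
--     return best_name
-- ===== Notes on version B (the rewrite author's own statement) =====
-- stated objective: simpler
-- what changed: B drops A's sort-the-table / score-list / dict-of-names / index-of-max machinery entirely: it makes a single pass over the rows keeping the best (name, score) seen so far, replacing it on a strictly higher score or on an equal score with a lexicographically smaller name, which reproduces A's tie-break (ascending sort + first maximum).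
import Mathlib
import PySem

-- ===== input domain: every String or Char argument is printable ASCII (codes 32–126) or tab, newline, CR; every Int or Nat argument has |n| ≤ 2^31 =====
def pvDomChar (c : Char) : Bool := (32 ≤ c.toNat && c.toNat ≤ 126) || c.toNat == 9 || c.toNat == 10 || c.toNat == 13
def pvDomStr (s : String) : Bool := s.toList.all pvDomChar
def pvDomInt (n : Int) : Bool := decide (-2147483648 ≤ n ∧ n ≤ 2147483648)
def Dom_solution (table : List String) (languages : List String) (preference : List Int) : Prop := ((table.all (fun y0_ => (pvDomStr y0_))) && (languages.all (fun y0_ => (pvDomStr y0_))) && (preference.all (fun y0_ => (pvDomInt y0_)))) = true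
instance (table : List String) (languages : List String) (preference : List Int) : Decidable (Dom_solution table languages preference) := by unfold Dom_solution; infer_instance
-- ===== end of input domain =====

-- B replaces A's sort + score list + dict + index-of-max with a single best-so-far pass (same result; simpler decomposition).


-- ===== PORT A =====
-- literal transliteration of A; on Pre_ every row is nonempty so 'x.headD ""' is Python's x[0]
-- and the '.getD' defaults are never consulted (Python raises exactly on the inputs Pre_ excludes).
def solution (table : List String) (languages : List String) (preference : List Int) : String :=
  let new_table := PySem.List.sorted (table.map (fun i => PySem.Str.split₀ i)) (fun x => x.headD "")
  let type : PySem.Dict Int String :=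
    (PySem.List.pyRange 0 (new_table.length : Int) 1).foldl
      (fun d i => d.insert i ((PySem.List.pyGetD new_table i []).headD "")) PySem.Dict.empty
  let score : List Int :=
    (PySem.List.pyRange 0 (type.size : Int) 1).foldl
      (fun sc i =>
        let s := (languages.zip preference).foldl
          (fun s lp => if (PySem.List.pyGetD new_table i []).contains lp.1 then
              s + (6 - (((PySem.List.index? (PySem.List.pyGetD new_table i []) lp.1).getD 0 : Nat) : Int)) * lp.2
            else s) 0
        sc ++ [s]) []
  let m := (PySem.List.max? score (fun x => x)).getD 0
  let j := (PySem.List.index? score m).getD 0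
  (type.get? ((j : Nat) : Int)).getD ""

-- ===== PORT B =====
-- literal transliteration of Source B (helpers mirror its inner generator expression and loop body)
def altScore (languages : List String) (preference : List Int) (row : List String) : Int :=
  (((languages.zip preference).filter (fun lp => row.contains lp.1)).map
    (fun lp => (6 - (((PySem.List.index? row lp.1).getD 0 : Nat) : Int)) * lp.2)).sum

def altPair (languages : List String) (preference : List Int) (row_str : String) : String × Int :=
  let row := PySem.Str.split₀ row_str
  (row.headD "", altScore languages preference row)

def altStep (languages : List String) (preference : List Int)
    (best : Option (String × Int)) (row_str : String) : Option (String × Int) :=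
  let p := altPair languages preference row_str
  match best with
  | none => some p
  | some (bn, bs) => if bs < p.2 ∨ (p.2 = bs ∧ p.1 < bn) then some p else some (bn, bs)

def solution_alt (table : List String) (languages : List String) (preference : List Int) : String :=
  match table.foldl (altStep languages preference) none with
  | some (bn, _) => bn
  | none => ""

-- ===== PRECONDITION & SPEC =====
-- Pre_ excludes exactly the inputs where the Python A raises: an empty table (max() of an
-- empty score list, ValueError) and a table row that is empty/whitespace-only (x[0], IndexError).
def Pre_solution (table : List String) (languages : List String) (preference : List Int) : Prop :=
  table ≠ [] ∧ ∀ t ∈ table, PySem.Str.split₀ t ≠ []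
instance (table : List String) (languages : List String) (preference : List Int) : Decidable (Pre_solution table languages preference) := by unfold Pre_solution; infer_instance
def pvWitness_solution : List String × List String × List Int :=
  (["jm python 3", "cv cpp 2"], ["python", "cpp"], [5, 4])
def Spec_solution (table : List String) (languages : List String) (preference : List Int) (out : String) : Prop := out = solution_alt table languages preference
instance (table : List String) (languages : List String) (preference : List Int) (out : String) : Decidable (Spec_solution table languages preference out) := by unfold Spec_solution; infer_instance

-- ===== CLAIM (what is proved, stated in full; the proofs are below) =====
def Claim_equal_solution : Prop := ∀ (table : List String) (languages : List String) (preference : List Int), Dom_solution table languages preference → Pre_solution table languages preference → Spec_solution table languages preference (solution table languages preference)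

-- ===== LEMMAS AND PROOFS =====

-- "x beats z": strictly higher score, or equal score and strictly smaller name.
def Beats (x z : String × Int) : Prop := z.2 < x.2 ∨ (x.2 = z.2 ∧ x.1 < z.1)

lemma beats_irrefl (x : String × Int) : ¬ Beats x x := by
  rintro (h | ⟨_, h⟩) <;> exact lt_irrefl _ h

lemma beats_asymm {x y : String × Int} (h : Beats x y) : ¬ Beats y x := by
  rintro (h2 | ⟨he2, h2⟩) <;> rcases h with h1 | ⟨he1, h1⟩
  · exact lt_asymm h1 h2
  · omega
  · omega
  · exact lt_asymm h1 h2

lemma beats_trans {x y z : String × Int} (h1 : Beats x y) (h2 : Beats y z) : Beats x z := by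
  rcases h1 with h1 | ⟨he1, h1⟩ <;> rcases h2 with h2 | ⟨he2, h2⟩
  · exact Or.inl (lt_trans h2 h1)
  · exact Or.inl (by omega)
  · exact Or.inl (by omega)
  · exact Or.inr ⟨by omega, lt_trans h1 h2⟩

lemma beats_trichotomy (x y : String × Int) : Beats x y ∨ x = y ∨ Beats y x := by
  rcases lt_trichotomy x.2 y.2 with h | h | h
  · exact Or.inr (Or.inr (Or.inl h))
  · rcases lt_trichotomy x.1 y.1 with h' | h' | h'
    · exact Or.inl (Or.inr ⟨h.symm ▸ rfl, h'⟩)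
    · exact Or.inr (Or.inl (Prod.ext h' h))
    · exact Or.inr (Or.inr (Or.inr ⟨h.symm, h'⟩))
  · exact Or.inl (Or.inl h)

lemma beats_unique {P : List (String × Int)} {z1 z2 : String × Int}
    (h1 : z1 ∈ P) (m1 : ∀ x ∈ P, ¬ Beats x z1)
    (h2 : z2 ∈ P) (m2 : ∀ x ∈ P, ¬ Beats x z2) : z1 = z2 := by
  rcases beats_trichotomy z1 z2 with h | h | h
  · exact absurd h (m2 z1 h1)
  · exact h
  · exact absurd h (m1 z2 h2)

-- if w does not beat z1 and z1 does not beat z, w does not beat z (totality of Beats)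
lemma not_beats_chain {w z1 z : String × Int} (hw : ¬ Beats w z1) (hz : ¬ Beats z1 z) :
    ¬ Beats w z := by
  intro hwz
  rcases beats_trichotomy w z1 with h | rfl | h
  · exact hw h
  · exact hz hwz
  · exact hz (beats_trans h hwz)

-- B's fold keeps a maximal element (w.r.t. Beats) of everything seen so far.
lemma alt_fold_maximal (L : List String) (P : List Int) :
    ∀ (l : List String) (z0 : String × Int),
    ∃ z, l.foldl (altStep L P) (some z0) = some z ∧
      z ∈ z0 :: l.map (altPair L P) ∧
      ∀ x ∈ z0 :: l.map (altPair L P), ¬ Beats x z := by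
  intro l
  induction l with
  | nil =>
    intro z0
    refine ⟨z0, rfl, List.mem_cons_self, ?_⟩
    intro x hx
    rcases List.mem_cons.1 hx with rfl | hx
    · exact beats_irrefl _
    · simp at hx
  | cons a l ih =>
    rintro ⟨bn, bs⟩
    by_cases h : Beats (altPair L P a) (bn, bs)
    · have h' : bs < (altPair L P a).2 ∨ ((altPair L P a).2 = bs ∧ (altPair L P a).1 < bn) := h
      have hstep : altStep L P (some (bn, bs)) a = some (altPair L P a) := by
        simp only [altStep]; rw [if_pos h']
      obtain ⟨z, hz, hmem, hmax⟩ := ih (altPair L P a)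
      have hbn : ¬ Beats (bn, bs) z :=
        not_beats_chain (beats_asymm h) (hmax _ List.mem_cons_self)
      refine ⟨z, by simpa [hstep] using hz, List.mem_cons_of_mem _ hmem, ?_⟩
      intro x hx
      rcases List.mem_cons.1 hx with rfl | hx
      · exact hbn
      · exact hmax x hx
    · have h' : ¬ (bs < (altPair L P a).2 ∨ ((altPair L P a).2 = bs ∧ (altPair L P a).1 < bn)) := h
      have hstep : altStep L P (some (bn, bs)) a = some (bn, bs) := by
        simp only [altStep]; rw [if_neg h']
      obtain ⟨z, hz, hmem, hmax⟩ := ih (bn, bs)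
      have hpa : ¬ Beats (altPair L P a) z :=
        not_beats_chain h (hmax _ List.mem_cons_self)
      refine ⟨z, by simpa [hstep] using hz, ?_, ?_⟩
      · rcases List.mem_cons.1 hmem with rfl | hmem
        · exact List.mem_cons_self
        · exact List.mem_cons_of_mem _ (List.mem_cons_of_mem _ hmem)
      · intro x hx
        rcases List.mem_cons.1 hx with rfl | hx
        · exact hmax _ List.mem_cons_self
        · rcases List.mem_cons.1 hx with rfl | hx
          · exact hpa
          · exact hmax x (List.mem_cons_of_mem _ hx)

-- A's inner score loop equals B's filter/map/sum formulation.
lemma score_eq (L : List String) (P : List Int) (row : List String) :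
    (L.zip P).foldl
      (fun s lp => if row.contains lp.1 then
          s + (6 - (((PySem.List.index? row lp.1).getD 0 : Nat) : Int)) * lp.2
        else s) 0 = altScore L P row := by
  rw [PySem.List.foldl_if_eq_foldl_filter, PySem.List.foldl_add]
  simp [altScore]

-- the first index of the maximal score, in the head-sorted table, is Beats-maximal.
lemma A_maximal (L : List String) (P : List Int) (nt : List (List String))
    (hp : nt.Pairwise (fun a b => a.headD "" ≤ b.headD ""))
    (m : Int) (j : Nat)
    (hmax : ∀ y ∈ nt.map (altScore L P), y ≤ m)
    (hj : PySem.List.index? (nt.map (altScore L P)) m = some j) :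
    ∃ (hlt : j < nt.length),
      altScore L P nt[j] = m ∧
      ∀ x ∈ nt.map (fun r => (r.headD "", altScore L P r)),
        ¬ Beats x ((nt[j]).headD "", m) := by
  obtain ⟨hk, hval, hfirst⟩ := PySem.List.getElem_of_index?_eq_some hj
  have hlt : j < nt.length := by simpa using hk
  have hval' : altScore L P nt[j] = m := by
    simpa using hval
  refine ⟨hlt, hval', ?_⟩
  intro x hx hB
  rw [List.mem_iff_getElem] at hx
  obtain ⟨k, hkk, hxe⟩ := hx
  have hkn : k < nt.length := by simpa using hkk
  have hxe' : x = ((nt[k]).headD "", altScore L P nt[k]) := by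
    rw [← hxe]; simp
  subst hxe'
  have hle : altScore L P nt[k] ≤ m :=
    hmax _ (List.mem_map_of_mem (nt.getElem_mem hkn))
  rcases hB with hB | ⟨hBe, hBl⟩
  · exact absurd hB (not_lt.2 hle)
  · -- equal score: k cannot be before j (j is the first max), so names are sorted
    have hjk : j ≤ k := by
      by_contra hc
      have hc' : k < j := by omega
      have := hfirst k (by simpa using hc')
      simp only [List.getElem_map] at this
      exact this (by simpa using hBe)
    rcases Nat.lt_or_ge j k with hjk' | hge
    · have := (List.pairwise_iff_getElem.mp hp) j k hlt hkn hjk'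
      exact absurd hBl (not_lt.2 this)
    · have : j = k := le_antisymm hjk hge
      subst this
      exact lt_irrefl _ hBl

-- B's result is the name of a Beats-maximal pair of the table.
lemma alt_spec (L : List String) (P : List Int) (table : List String) (hne : table ≠ []) :
    ∃ z, solution_alt table L P = z.1 ∧ z ∈ table.map (altPair L P) ∧
      ∀ x ∈ table.map (altPair L P), ¬ Beats x z := by
  cases table with
  | nil => exact absurd rfl hne
  | cons t ts =>
    obtain ⟨z, hz, hmem, hmax⟩ := alt_fold_maximal L P ts (altPair L P t)
    refine ⟨z, ?_, by simpa using hmem, by simpa using hmax⟩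
    simp only [solution_alt, List.foldl_cons]
    have hstep : altStep L P none t = some (altPair L P t) := rfl
    rw [hstep, hz]

-- ===== VERDICT (by name: the statement is the Claim_ definition above) =====
theorem solution_spec : Claim_equal_solution := by
  intro table L P _ hpre
  obtain ⟨hne, _⟩ := hpre
  show solution table L P = solution_alt table L P
  simp only [solution]
  set nt := PySem.List.sorted (table.map (fun i => PySem.Str.split₀ i)) (fun x => x.headD "") with hnt
  have hntne : nt ≠ [] := by
    rw [hnt, Ne, PySem.List.sorted_eq_nil_iff]
    simpa using hne
  set type := (PySem.List.pyRange 0 (nt.length : Int) 1).foldl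
      (fun d i => d.insert i ((PySem.List.pyGetD nt i []).headD "")) PySem.Dict.empty with htype
  have hitems : type.items =
      (PySem.List.pyRange 0 (nt.length : Int) 1).map
        (fun i => (i, (PySem.List.pyGetD nt i []).headD "")) := by
    rw [htype]
    rw [PySem.Dict.items_foldl_insert_fresh (PySem.List.pyRange 0 (nt.length : Int) 1)
      (fun a => a) (fun i => (PySem.List.pyGetD nt i []).headD "") PySem.Dict.empty
      (fun a _ => PySem.Dict.contains_empty a)
      (by simpa using PySem.List.nodup_pyRange_one 0 (nt.length : Int))]
    simp [PySem.Dict.empty]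
  have hsize : type.size = nt.length := by
    show type.items.length = _
    rw [hitems]
    simp [PySem.List.length_pyRange_one]
  rw [hsize]
  rw [PySem.List.foldl_pyRange_zero_pyGetD' nt []
    (fun sc row => sc ++ [(L.zip P).foldl
      (fun s lp => if row.contains lp.1 then
          s + (6 - (((PySem.List.index? row lp.1).getD 0 : Nat) : Int)) * lp.2
        else s) 0]) []]
  rw [PySem.List.foldl_append_singleton_eq_map]
  simp only [List.nil_append, score_eq]
  obtain ⟨m0, hm0⟩ : ∃ m0,
      PySem.List.max? (nt.map (fun row => altScore L P row)) (fun x => x) = some m0 := by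
    cases hcase : PySem.List.max? (nt.map (fun row => altScore L P row)) (fun x => x) with
    | none =>
      rw [PySem.List.max?_eq_none_iff] at hcase
      simp [hntne] at hcase
    | some m => exact ⟨m, rfl⟩
  rw [hm0]
  simp only [Option.getD_some]
  have hmemm : m0 ∈ nt.map (fun row => altScore L P row) := PySem.List.max?_mem hm0
  obtain ⟨j0, hj0⟩ : ∃ j0,
      PySem.List.index? (nt.map (fun row => altScore L P row)) m0 = some j0 := by
    have h := (PySem.List.index?_isSome_iff (nt.map (fun row => altScore L P row)) m0).2 hmemm
    exact Option.isSome_iff_exists.mp h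
  rw [hj0]
  simp only [Option.getD_some]
  -- A's value: the head of row j0
  obtain ⟨hlt, hvalm, hAmax⟩ := A_maximal L P nt
    (by rw [hnt]
        exact PySem.List.sorted_pairwise (table.map (fun i => PySem.Str.split₀ i))
          (fun x => x.headD ""))
    m0 j0 (fun y hy => PySem.List.max?_isMax hm0 y hy) (by simpa using hj0)
  have hnodup : type.keys.Nodup := by
    have hk : type.keys = type.items.map (·.1) := rfl
    rw [hk, hitems, List.map_map]
    simpa [Function.comp_def] using PySem.List.nodup_pyRange_one 0 (nt.length : Int)
  have hmemit : (((j0 : Nat) : Int), (nt[j0]'hlt).headD "") ∈ type.items := by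
    rw [hitems]
    refine List.mem_map.2 ⟨((j0 : Nat) : Int), ?_, ?_⟩
    · rw [PySem.List.mem_pyRange_one]
      constructor
      · positivity
      · exact_mod_cast hlt
    · simp only [PySem.List.pyGetD_natCast]
      rw [List.getD_eq_getElem _ _ hlt]
  have hget : type.get? ((j0 : Nat) : Int) = some ((nt[j0]'hlt).headD "") :=
    PySem.Dict.get?_of_mem_items type hmemit hnodup
  rw [hget]
  simp only [Option.getD_some]
  -- B's value: the maximal pair of the (unsorted) table
  obtain ⟨z, hzval, hzmem, hzmax⟩ := alt_spec L P table hne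
  -- both are Beats-maximal members of the same collection of pairs
  have hsetiff : ∀ x, x ∈ table.map (altPair L P) ↔
      x ∈ nt.map (fun r => (r.headD "", altScore L P r)) := by
    intro x
    have h1 : table.map (altPair L P) =
        (table.map (fun i => PySem.Str.split₀ i)).map (fun r => (r.headD "", altScore L P r)) := by
      rw [List.map_map]; rfl
    rw [h1, hnt]
    constructor <;> intro hx
    · obtain ⟨r, hr, rfl⟩ := List.mem_map.1 hx
      exact List.mem_map_of_mem ((PySem.List.mem_sorted _ _ _ r).2 hr)
    · obtain ⟨r, hr, rfl⟩ := List.mem_map.1 hx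
      exact List.mem_map_of_mem ((PySem.List.mem_sorted _ _ _ r).1 hr)
  have hzAmem : ((nt[j0]'hlt).headD "", m0) ∈ nt.map (fun r => (r.headD "", altScore L P r)) := by
    rw [← hvalm]
    exact List.mem_map_of_mem (nt.getElem_mem hlt)
  have hzeq : ((nt[j0]'hlt).headD "", m0) = z :=
    beats_unique hzAmem hAmax ((hsetiff z).1 hzmem)
      (fun x hx => hzmax x ((hsetiff x).2 hx))
  rw [hzval, ← hzeq]
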